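-- pv_equiv track=rewrite | github.com/wreis/find_subsequence | find_subsequence.py | _find_diff_highest_sum
-- ===== SOURCE A (Python) =====
-- from itertools import islice
--
-- def _subseq_as_differences(iter):
--     """Helper function to compute sum of absolute differences in a sequence"""
--
--     sequence = list(iter)
--     return sum(
--         abs(sequence[i] - sequence[i+1])
--         for i in range(0, len(sequence)-1)
--     )
--
-- def _find_diff_highest_sum(sequence, length):
--     """Implements logic for extended task (differences option)"""
--
--     seq_length = len(sequence)
--     subsequences = list(
--         map(
--             lambda seq: _subseq_as_differences(seq),
--             (
--                 map(lambda x: x, islice(sequence, j, length+j))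
--                 for j in range(0, seq_length-length+1)
--             )
--         )
--     )
--     return max(subsequences)
-- ===== SOURCE B (Python) =====
-- def _find_diff_highest_sum(sequence, length):
--     # Windows of length <= 1 contain no adjacent pair, so their difference-sum is 0.
--     if length <= 1:
--         return 0
--     # prefix[k] = sum of the first k adjacent absolute differences of `sequence`.
--     prefix = [0]
--     for i in range(len(sequence) - 1):
--         prefix.append(prefix[-1] + abs(sequence[i + 1] - sequence[i]))
--     # The window starting at j covers differences j .. j+length-2.
--     return max(prefix[j + length - 1] - prefix[j]
--                for j in range(len(sequence) - length + 1))
-- ===== Notes on version B (the rewrite author's own statement) =====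
-- stated objective: faster
-- what changed: Replaces the per-window rebuild-and-resum (each window sliced out and its adjacent absolute differences summed from scratch) by one prefix-sum array of the adjacent absolute differences, so each window's value is a single subtraction.
import Mathlib
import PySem

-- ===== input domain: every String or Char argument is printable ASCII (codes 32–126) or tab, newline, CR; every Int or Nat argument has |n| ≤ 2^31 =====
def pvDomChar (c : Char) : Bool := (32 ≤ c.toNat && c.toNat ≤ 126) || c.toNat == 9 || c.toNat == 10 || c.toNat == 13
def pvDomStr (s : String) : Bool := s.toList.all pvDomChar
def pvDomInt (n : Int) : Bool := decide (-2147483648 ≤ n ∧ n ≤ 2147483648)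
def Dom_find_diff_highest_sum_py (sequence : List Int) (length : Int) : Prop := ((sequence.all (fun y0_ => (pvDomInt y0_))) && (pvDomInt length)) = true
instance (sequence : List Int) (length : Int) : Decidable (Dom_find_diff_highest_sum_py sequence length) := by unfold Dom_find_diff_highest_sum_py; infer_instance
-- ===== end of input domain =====

-- B replaces A's per-window re-summing of adjacent absolute differences by one prefix-sum array (faster, asymptotic).


-- ===== PORT A =====
-- helper _subseq_as_differences; the indices i, i+1 are always in range, so pyGetD with default 0 is exact
def subseq_as_differences_py (seq : List Int) : Int :=
  ((PySem.List.pyRange 0 ((seq.length : Int) - 1) 1).map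
    (fun i => |PySem.List.pyGetD seq i 0 - PySem.List.pyGetD seq (i + 1) 0|)).sum

-- islice(sequence, j, length+j) on a list with 0 ≤ j and 0 ≤ length+j (holds under Pre_) is the slice sequence[j:length+j]
def find_diff_highest_sum_py (sequence : List Int) (length : Int) : Int :=
  let seq_length : Int := sequence.length
  let subsequences :=
    (PySem.List.pyRange 0 (seq_length - length + 1) 1).map
      (fun j => subseq_as_differences_py (PySem.List.slice sequence (some j) (some (length + j))))
  -- Python's max raises on an empty list (excluded by Pre_); the getD 0 default is never reached under Pre_
  (PySem.List.max? subsequences (fun x => x)).getD 0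

-- ===== PORT B =====
def find_diff_highest_sum_py_alt (sequence : List Int) (length : Int) : Int :=
  if length ≤ 1 then 0
  else
    let pre :=
      (PySem.List.pyRange 0 ((sequence.length : Int) - 1) 1).foldl
        (fun acc i =>
          acc ++ [PySem.List.pyGetD acc (-1) 0 +
                  |PySem.List.pyGetD sequence (i + 1) 0 - PySem.List.pyGetD sequence i 0|])
        [0]
    let vals :=
      (PySem.List.pyRange 0 ((sequence.length : Int) - length + 1) 1).map
        (fun j => PySem.List.pyGetD pre (j + length - 1) 0 - PySem.List.pyGetD pre j 0)
    -- Python's max raises on an empty generator (excluded by Pre_); the getD 0 default is never reached under Pre_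
    (PySem.List.max? vals (fun x => x)).getD 0

-- ===== PRECONDITION & SPEC =====
-- A raises ValueError when length < 0 (islice rejects a negative stop) or length > len(sequence) (max of an empty list); Pre_ excludes exactly those
def Pre_find_diff_highest_sum_py (sequence : List Int) (length : Int) : Prop :=
  0 ≤ length ∧ length ≤ (sequence.length : Int)
instance (sequence : List Int) (length : Int) : Decidable (Pre_find_diff_highest_sum_py sequence length) := by unfold Pre_find_diff_highest_sum_py; infer_instance

def pvWitness_find_diff_highest_sum_py : List Int × Int := ([1, 5, 2, 9], 2)

def Spec_find_diff_highest_sum_py (sequence : List Int) (length : Int) (out : Int) : Prop := out = find_diff_highest_sum_py_alt sequence length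
instance (sequence : List Int) (length : Int) (out : Int) : Decidable (Spec_find_diff_highest_sum_py sequence length out) := by unfold Spec_find_diff_highest_sum_py; infer_instance

-- ===== CLAIM (what is proved, stated in full; the proofs are below) =====
def Claim_equal_find_diff_highest_sum_py : Prop := ∀ (sequence : List Int) (length : Int), Dom_find_diff_highest_sum_py sequence length → Pre_find_diff_highest_sum_py sequence length → Spec_find_diff_highest_sum_py sequence length (find_diff_highest_sum_py sequence length)

-- ===== LEMMAS AND PROOFS =====

def dsum (s : List Int) (k : Nat) : Int :=
  ((List.range k).map (fun t : Nat => |PySem.List.pyGetD s ((t : Int) + 1) 0 - PySem.List.pyGetD s (t : Int) 0|)).sum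

theorem dsum_succ (s : List Int) (k : Nat) :
    dsum s (k + 1) = dsum s k + |PySem.List.pyGetD s ((k : Int) + 1) 0 - PySem.List.pyGetD s (k : Int) 0| := by
  simp [dsum, List.range_succ]

theorem pyGetD_neg_one_append (xs : List Int) (x : Int) :
    PySem.List.pyGetD (xs ++ [x]) (-1) 0 = x := by
  simp [PySem.List.pyGetD, PySem.List.pyGet?, PySem.List.pyIdx?]

theorem prefix_foldl_eq (s : List Int) (k : Nat) :
    ((List.range k).map (fun t : Nat => (t : Int))).foldl
      (fun acc i =>
        acc ++ [PySem.List.pyGetD acc (-1) 0 +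
                |PySem.List.pyGetD s (i + 1) 0 - PySem.List.pyGetD s i 0|])
      [0]
    = (List.range (k + 1)).map (fun t => dsum s t) := by
  induction k with
  | zero => simp [dsum]
  | succ k ih =>
      rw [List.range_succ, List.map_append, List.foldl_append, ih]
      simp only [List.map_cons, List.map_nil, List.foldl_cons, List.foldl_nil]
      rw [show (List.range (k+1)).map (fun t => dsum s t)
          = ((List.range k).map (fun t => dsum s t)) ++ [dsum s k] by
            rw [List.range_succ, List.map_append]; rfl]
      rw [pyGetD_neg_one_append]
      rw [show List.range (k+1+1) = List.range (k+1) ++ [k+1] from List.range_succ]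
      rw [List.map_append, List.range_succ, List.map_append]
      simp [dsum_succ]

theorem getD_range_dsum (s : List Int) (n m : Nat) (h : m < n) :
    PySem.List.pyGetD ((List.range n).map (fun t => dsum s t)) (m : Int) 0 = dsum s m := by
  rw [PySem.List.pyGetD_natCast]
  simp [List.getD, h]

theorem pyGetD_drop_take (s : List Int) (j m i : Nat) (h : i < ((s.drop j).take m).length) :
    PySem.List.pyGetD ((s.drop j).take m) (i : Int) 0 = PySem.List.pyGetD s ((j + i : Nat) : Int) 0 := by
  rw [PySem.List.pyGetD_natCast, PySem.List.pyGetD_natCast]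
  have h1 : i < m := by simp at h; omega
  have h2 : j + i < s.length := by simp at h; omega
  simp [List.getD, h1, h2, List.getElem?_drop]

theorem telescope (s : List Int) (j c : Nat) :
    ((List.range c).map (fun i : Nat => |PySem.List.pyGetD s (((j + i : Nat) : Int) + 1) 0
        - PySem.List.pyGetD s ((j + i : Nat) : Int) 0|)).sum = dsum s (j + c) - dsum s j := by
  induction c with
  | zero => simp
  | succ c ih =>
      rw [List.range_succ, List.map_append, List.sum_append, ih,
        show j + (c + 1) = (j + c) + 1 from rfl, dsum_succ]
      push_cast
      simp
      ring

theorem window_eq (s : List Int) (L j : Int) (h2 : 2 ≤ L) (hLn : L ≤ (s.length : Int))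
    (hj0 : 0 ≤ j) (hjlt : j < (s.length : Int) - L + 1) :
    subseq_as_differences_py (PySem.List.slice s (some j) (some (L + j)))
      = dsum s (j.toNat + L.toNat - 1) - dsum s j.toNat := by
  have hLj : 0 ≤ L + j := by omega
  rw [PySem.List.slice_toNat s hj0 hLj]
  have htn : (L + j).toNat - j.toNat = L.toNat := by omega
  rw [htn]
  set sl := (s.drop j.toNat).take L.toNat with hsl
  have hjLn : j.toNat + L.toNat ≤ s.length := by omega
  have hlen : sl.length = L.toNat := by simp [hsl]; omega
  unfold subseq_as_differences_py
  have hb : ((sl.length : Int) - 1) = ((L.toNat - 1 : Nat) : Int) := by rw [hlen]; omega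
  rw [hb, PySem.List.pyRange_zero, Int.toNat_natCast, List.map_map]
  have hcong : ∀ i ∈ List.range (L.toNat - 1),
      ((fun i => |PySem.List.pyGetD sl i 0 - PySem.List.pyGetD sl (i + 1) 0|) ∘ (fun k : Nat => (k : Int))) i
      = |PySem.List.pyGetD s (((j.toNat + i : Nat) : Int) + 1) 0 - PySem.List.pyGetD s ((j.toNat + i : Nat) : Int) 0| := by
    intro i hi
    have hi' : i < L.toNat - 1 := List.mem_range.mp hi
    have h1 : i < sl.length := by omega
    have h1' : i + 1 < sl.length := by omega
    simp only [Function.comp]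
    rw [show ((i : Int) + 1) = ((i + 1 : Nat) : Int) by push_cast; ring]
    rw [pyGetD_drop_take s j.toNat L.toNat i h1, pyGetD_drop_take s j.toNat L.toNat (i+1) h1']
    rw [abs_sub_comm]
    rw [show ((j.toNat + (i + 1) : Nat) : Int) = ((j.toNat + i : Nat) : Int) + 1 by push_cast; ring]
  rw [List.map_congr_left hcong, telescope,
    show j.toNat + (L.toNat - 1) = j.toNat + L.toNat - 1 by omega]

theorem main (s : List Int) (L : Int) (h0 : 0 ≤ L) (hn : L ≤ (s.length : Int)) :
    find_diff_highest_sum_py s L = find_diff_highest_sum_py_alt s L := by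
  by_cases hL1 : L ≤ 1
  · -- every window has at most one element, so every difference-sum is 0 and so is the max
    rw [find_diff_highest_sum_py_alt, if_pos hL1]
    unfold find_diff_highest_sum_py
    simp only []
    set listA := (PySem.List.pyRange 0 ((s.length : Int) - L + 1) 1).map
      (fun j => subseq_as_differences_py (PySem.List.slice s (some j) (some (L + j)))) with hlistA
    have hne : listA ≠ [] := by
      rw [hlistA]
      simp [List.map_eq_nil_iff]
      intro hcon
      have := congrArg List.length hcon
      rw [PySem.List.length_pyRange_one] at this
      simp at this
      omega
    have hzero : ∀ x ∈ listA, x = 0 := by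
      intro x hx
      rw [hlistA] at hx
      obtain ⟨j, hj, hfx⟩ := List.mem_map.mp hx
      obtain ⟨hj0, hjlt⟩ := (PySem.List.mem_pyRange_one).mp hj
      have hLj : 0 ≤ L + j := by omega
      rw [PySem.List.slice_toNat s hj0 hLj] at hfx
      subst hfx
      unfold subseq_as_differences_py
      have hlen : (((s.drop j.toNat).take ((L + j).toNat - j.toNat)).length : Int) - 1 ≤ 0 := by
        simp
        omega
      rw [PySem.List.pyRange_one_eq_nil (by omega : ((((s.drop j.toNat).take ((L + j).toNat - j.toNat)).length : Int) - 1) ≤ 0)]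
      simp
    cases hmax : PySem.List.max? listA (fun x => x) with
    | none => exact absurd (PySem.List.max?_eq_none_iff listA _ |>.mp hmax) hne
    | some m =>
        have := PySem.List.max?_mem hmax
        simp [hzero m this]
  · -- 2 ≤ L : both sides map the same window values over the same range of starts
    push Not at hL1
    rw [find_diff_highest_sum_py_alt, if_neg (by omega)]
    unfold find_diff_highest_sum_py
    simp only []
    have hn1 : ((s.length : Int) - 1) = ((s.length - 1 : Nat) : Int) := by omega
    rw [hn1, PySem.List.pyRange_zero (((s.length - 1 : Nat) : Int)), Int.toNat_natCast,
      prefix_foldl_eq]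
    have hsn : s.length - 1 + 1 = s.length := by omega
    rw [hsn]
    congr 1
    congr 1
    apply List.map_congr_left
    intro j hj
    obtain ⟨hj0, hjlt⟩ := (PySem.List.mem_pyRange_one).mp hj
    rw [window_eq s L j (by omega) hn hj0 hjlt]
    have e1 : j + L - 1 = ((j.toNat + L.toNat - 1 : Nat) : Int) := by omega
    have e2 : j = ((j.toNat : Nat) : Int) := by omega
    rw [e1, getD_range_dsum s s.length _ (by omega)]
    rw [show PySem.List.pyGetD ((List.range s.length).map (fun t => dsum s t)) j 0
        = dsum s j.toNat by rw [e2, getD_range_dsum s s.length _ (by omega), Int.toNat_natCast]]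

-- ===== VERDICT (by name: the statement is the Claim_ definition above) =====
theorem find_diff_highest_sum_py_spec : Claim_equal_find_diff_highest_sum_py := by
  intro s L _ hPre
  unfold Spec_find_diff_highest_sum_py
  exact main s L hPre.1 hPre.2
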